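-- pv_equiv track=rewrite | github.com/FishRom/school | krylov_v20/12.py | f
-- ===== SOURCE A (Python) =====
-- def f(k):
--     n = '>' + '1' * 11 + '2' * k + '3' * 11
--     while '>1' in n or '>2' in n or '>3' in n:
--         if '>1' in n:
--             n = n.replace('>1', '222>', 1)
--         if '>2' in n:
--             n = n.replace('>2', '3>', 1)
--         if '>3' in n:
--             n = n.replace('>3', '1>', 1)
--     return n.replace('>', '')
-- ===== SOURCE B (Python) =====
-- def f(k):
--     # The rewriting head walks left to right exactly once: each '1' becomes '222'
--     # (left of the head), each '2' becomes '3', each '3' becomes '1'.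
--     # So the fixed point is directly '2'*33 + '3'*k + '1'*11.
--     return '2' * 33 + '3' * k + '1' * 11
-- ===== Notes on version B (the rewrite author's own statement) =====
-- stated objective: faster
-- what changed: Replaces the quadratic string-rewriting while-loop (repeated substring search and first-occurrence replace) by directly constructing the loop's fixed-point string in one concatenation.
import Mathlib
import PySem

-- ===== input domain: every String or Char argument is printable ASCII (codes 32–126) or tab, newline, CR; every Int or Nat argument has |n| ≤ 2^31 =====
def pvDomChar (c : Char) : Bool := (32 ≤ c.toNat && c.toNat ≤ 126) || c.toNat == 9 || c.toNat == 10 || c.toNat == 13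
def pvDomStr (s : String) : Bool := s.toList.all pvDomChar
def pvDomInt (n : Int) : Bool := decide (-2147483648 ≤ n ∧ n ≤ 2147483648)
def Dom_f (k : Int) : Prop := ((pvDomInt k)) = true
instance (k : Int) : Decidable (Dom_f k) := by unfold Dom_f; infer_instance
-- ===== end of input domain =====

-- B replaces A's rewrite loop by directly building the loop's fixed point (objective: faster).

-- ===== PORT A =====
-- s.replace(old, new, 1): replace the FIRST occurrence only.  Ported by hand, step
-- for step, because PySem.Chars.replace has no count argument; exact for old ≠ ''.
def pvRepOnce : List Char → List Char → List Char → List Char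
  | [], _, _ => []
  | c :: t, old, new =>
    if old.isPrefixOf (c :: t) then new ++ (c :: t).drop old.length
    else c :: pvRepOnce t old new

-- the while-loop of A; the fuel only makes the same computation total (one unit per
-- iteration; f passes len(n), which exceeds the loop's iteration count on f's inputs)
def pvLoop : Nat → List Char → List Char
  | 0, n => n
  | fuel+1, n =>
    if PySem.Chars.isIn ['>','1'] n || PySem.Chars.isIn ['>','2'] n
        || PySem.Chars.isIn ['>','3'] n then
      let n1 := if PySem.Chars.isIn ['>','1'] n then pvRepOnce n ['>','1'] ['2','2','2','>'] else n
      let n2 := if PySem.Chars.isIn ['>','2'] n1 then pvRepOnce n1 ['>','2'] ['3','>'] else n1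
      let n3 := if PySem.Chars.isIn ['>','3'] n2 then pvRepOnce n2 ['>','3'] ['1','>'] else n2
      pvLoop fuel n3
    else n

def f (k : Int) : String :=
  let n : List Char := '>' :: (List.replicate 11 '1' ++ PySem.List.pyRepeat ['2'] k ++ List.replicate 11 '3')
  String.ofList (PySem.Chars.replace (pvLoop n.length n) ['>'] [])

-- ===== PORT B =====
def f_alt (k : Int) : String :=
  String.ofList (List.replicate 33 '2' ++ PySem.List.pyRepeat ['3'] k ++ List.replicate 11 '1')

-- ===== PRECONDITION & SPEC =====
def Spec_f (k : Int) (out : String) : Prop := out = f_alt k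
instance (k : Int) (out : String) : Decidable (Spec_f k out) := by unfold Spec_f; infer_instance

-- ===== CLAIM (what is proved, stated in full; the proofs are below) =====
def Claim_equal_f : Prop := ∀ (k : Int), Dom_f k → Spec_f k (f k)

-- ===== LEMMAS AND PROOFS =====

-- the shape every intermediate string of A's loop has:
-- (twos, threes, ones already produced) ++ '>' ++ (ones, twos, threes still to consume)
def pvSt (x y z b c d : Nat) : List Char :=
  (List.replicate x '2' ++ List.replicate y '3' ++ List.replicate z '1')
    ++ '>' :: (List.replicate b '1' ++ List.replicate c '2' ++ List.replicate d '3')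

lemma pvInfix_iff (ch : Char) (L R : List Char) (hL : '>' ∉ L) (hR : '>' ∉ R) :
    PySem.Chars.isIn ['>', ch] (L ++ '>' :: R) = true ↔ R.head? = some ch := by
  rw [PySem.Chars.isIn_iff_infix]
  induction L with
  | nil =>
    simp only [List.nil_append]
    rw [List.infix_cons_iff]
    constructor
    · rintro (h | h)
      · rcases h with ⟨t, ht⟩
        cases R with
        | nil => simp at ht
        | cons r R' =>
          simp only [List.cons_append, List.cons.injEq] at ht
          simp [ht.2.1]
      · exact absurd (h.mem (by simp)) hR
    · intro h
      cases R with
      | nil => simp at h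
      | cons r R' =>
        simp only [List.head?_cons, Option.some.injEq] at h
        subst h
        exact Or.inl ⟨R', rfl⟩
  | cons a L ih =>
    have ha : a ≠ '>' := fun h => hL (by simp [h])
    have hL' : '>' ∉ L := fun h => hL (by simp [h])
    rw [List.cons_append, List.infix_cons_iff]
    constructor
    · rintro (h | h)
      · rcases h with ⟨t, ht⟩
        simp only [List.cons_append, List.cons.injEq] at ht
        exact absurd ht.1.symm ha
      · exact (ih hL').mp h
    · intro h
      exact Or.inr ((ih hL').mpr h)

lemma pvIsIn_eq (ch : Char) (L R : List Char) (hL : '>' ∉ L) (hR : '>' ∉ R) :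
    PySem.Chars.isIn ['>', ch] (L ++ '>' :: R) = decide (R.head? = some ch) := by
  by_cases h : R.head? = some ch
  · rw [(pvInfix_iff ch L R hL hR).mpr h]
    simp [h]
  · have hne : ¬ PySem.Chars.isIn ['>', ch] (L ++ '>' :: R) = true :=
      fun hc => h ((pvInfix_iff ch L R hL hR).mp hc)
    simp only [Bool.not_eq_true] at hne
    simp [h, hne]

lemma pvRepOnce_at (L R new : List Char) (ch : Char) (hL : '>' ∉ L) :
    pvRepOnce (L ++ '>' :: ch :: R) ['>', ch] new = L ++ new ++ R := by
  induction L with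
  | nil =>
    simp [pvRepOnce, List.isPrefixOf]
  | cons a L ih =>
    have ha : a ≠ '>' := fun h => hL (by simp [h])
    have hL' : '>' ∉ L := fun h => hL (by simp [h])
    simp only [List.cons_append, pvRepOnce, List.isPrefixOf]
    rw [if_neg (by simp [Ne.symm ha]), ih hL']

lemma pvNoGtL (x y z : Nat) :
    '>' ∉ List.replicate x '2' ++ List.replicate y '3' ++ List.replicate z '1' := by
  simp [List.mem_append, List.mem_replicate]

lemma pvNoGtR (b c d : Nat) :
    '>' ∉ List.replicate b '1' ++ List.replicate c '2' ++ List.replicate d '3' := by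
  simp [List.mem_append, List.mem_replicate]

lemma pvIsIn_st (ch : Char) (x y z b c d : Nat) :
    PySem.Chars.isIn ['>', ch] (pvSt x y z b c d)
      = decide ((List.replicate b '1' ++ List.replicate c '2' ++ List.replicate d '3').head? = some ch) :=
  pvIsIn_eq ch _ _ (pvNoGtL x y z) (pvNoGtR b c d)

lemma pvRepCons (a : Char) (x : Nat) (w : List Char) :
    List.replicate x a ++ a :: w = a :: (List.replicate x a ++ w) := by
  induction x with
  | zero => simp
  | succ x ih => simp [List.replicate_succ, ih]

lemma pvStep1 (x b c d : Nat) :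
    pvRepOnce (pvSt x 0 0 (b+1) c d) ['>','1'] ['2','2','2','>'] = pvSt (x+3) 0 0 b c d := by
  have h := pvRepOnce_at (List.replicate x '2')
      (List.replicate b '1' ++ List.replicate c '2' ++ List.replicate d '3')
      ['2','2','2','>'] '1' (by simp [List.mem_replicate])
  simp only [pvSt, List.replicate_zero, List.nil_append, List.append_nil, List.replicate_succ,
    List.cons_append, List.append_assoc] at h ⊢
  rw [h]
  simp [pvRepCons]

lemma pvStep2 (x y c d : Nat) :
    pvRepOnce (pvSt x y 0 0 (c+1) d) ['>','2'] ['3','>'] = pvSt x (y+1) 0 0 c d := by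
  have h := pvRepOnce_at (List.replicate x '2' ++ List.replicate y '3')
      (List.replicate c '2' ++ List.replicate d '3') ['3','>'] '2'
      (by simp [List.mem_append, List.mem_replicate])
  simp only [pvSt, List.replicate_zero, List.nil_append, List.append_nil, List.replicate_succ,
    List.cons_append, List.append_assoc] at h ⊢
  rw [h]
  simp [pvRepCons]

lemma pvStep3 (x y z d : Nat) :
    pvRepOnce (pvSt x y z 0 0 (d+1)) ['>','3'] ['1','>'] = pvSt x y (z+1) 0 0 d := by
  have h := pvRepOnce_at (List.replicate x '2' ++ List.replicate y '3' ++ List.replicate z '1')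
      (List.replicate d '3') ['1','>'] '3' (pvNoGtL x y z)
  simp only [pvSt, List.replicate_zero, List.nil_append, List.append_nil, List.replicate_succ,
    List.cons_append, List.append_assoc] at h ⊢
  rw [h]
  simp [pvRepCons]

lemma pvLoop_st (fuel : Nat) : ∀ x y z b c d : Nat,
    (0 < y ∨ 0 < z → b = 0) → (0 < z → c = 0) → b + c + d ≤ fuel →
    pvLoop fuel (pvSt x y z b c d)
      = List.replicate (x + 3*b) '2' ++ List.replicate (y + c) '3'
          ++ List.replicate (z + d) '1' ++ ['>'] := by
  induction fuel with
  | zero =>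
    intro x y z b c d h1 h2 hle
    have hb : b = 0 := by omega
    have hc : c = 0 := by omega
    have hd : d = 0 := by omega
    subst hb; subst hc; subst hd
    simp [pvLoop, pvSt]
  | succ fuel ih =>
    intro x y z b c d h1 h2 hle
    cases b with
    | succ b' =>
      have hy : y = 0 := by omega
      have hz : z = 0 := by omega
      subst hy; subst hz
      have e1 : PySem.Chars.isIn ['>','1'] (pvSt x 0 0 (b'+1) c d) = true := by
        rw [pvIsIn_st]; simp [List.replicate_succ]
      cases b' with
      | succ b'' =>
        have e2 : PySem.Chars.isIn ['>','2'] (pvSt (x+3) 0 0 (b''+1) c d) = false := by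
          rw [pvIsIn_st]; simp [List.replicate_succ]
        have e3 : PySem.Chars.isIn ['>','3'] (pvSt (x+3) 0 0 (b''+1) c d) = false := by
          rw [pvIsIn_st]; simp [List.replicate_succ]
        simp only [pvLoop, Bool.false_eq_true, reduceIte, e1, Bool.true_or, pvStep1, e2, e3]
        rw [show x + 3*(b''+1+1) = x + 3 + 3*(b''+1) by ring]
        exact ih (x+3) 0 0 (b''+1) c d (by omega) (by omega) (by omega)
      | zero =>
        cases c with
        | succ c' =>
          have e2 : PySem.Chars.isIn ['>','2'] (pvSt (x+3) 0 0 0 (c'+1) d) = true := by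
            rw [pvIsIn_st]; simp [List.replicate_succ]
          cases c' with
          | succ c'' =>
            have e3 : PySem.Chars.isIn ['>','3'] (pvSt (x+3) 1 0 0 (c''+1) d) = false := by
              rw [pvIsIn_st]; simp [List.replicate_succ]
            simp only [pvLoop, Bool.false_eq_true, reduceIte, e1, Bool.true_or, pvStep1, e2, pvStep2, e3]
            rw [show x + 3*(0+1) = x + 3 + 3*0 by ring, show (0:Nat) + (c''+1+1) = 1 + (c''+1) by ring]
            exact ih (x+3) 1 0 0 (c''+1) d (by omega) (by omega) (by omega)
          | zero =>
            cases d with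
            | succ d' =>
              have e3 : PySem.Chars.isIn ['>','3'] (pvSt (x+3) 1 0 0 0 (d'+1)) = true := by
                rw [pvIsIn_st]; simp [List.replicate_succ]
              simp only [pvLoop, reduceIte, e1, Bool.true_or, pvStep1, e2, pvStep2, e3, pvStep3]
              rw [show x + 3*(0+1) = x + 3 + 3*0 by ring, show (0:Nat) + 1 = 1 + 0 by ring,
                show (0:Nat) + (d'+1) = 1 + d' by ring]
              exact ih (x+3) 1 1 0 0 d' (by omega) (by omega) (by omega)
            | zero =>
              have e3 : PySem.Chars.isIn ['>','3'] (pvSt (x+3) 1 0 0 0 0) = false := by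
                rw [pvIsIn_st]; simp
              simp only [pvLoop, Bool.false_eq_true, reduceIte, e1, Bool.true_or, pvStep1, e2, pvStep2, e3]
              rw [show x + 3*(0+1) = x + 3 + 3*0 by ring, show (0:Nat) + 1 = 1 + 0 by ring]
              exact ih (x+3) 1 0 0 0 0 (by omega) (by omega) (by omega)
        | zero =>
          cases d with
          | succ d' =>
            have e2 : PySem.Chars.isIn ['>','2'] (pvSt (x+3) 0 0 0 0 (d'+1)) = false := by
              rw [pvIsIn_st]; simp [List.replicate_succ]
            have e3 : PySem.Chars.isIn ['>','3'] (pvSt (x+3) 0 0 0 0 (d'+1)) = true := by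
              rw [pvIsIn_st]; simp [List.replicate_succ]
            simp only [pvLoop, Bool.false_eq_true, reduceIte, e1, Bool.true_or, pvStep1, e2, e3, pvStep3]
            rw [show x + 3*(0+1) = x + 3 + 3*0 by ring, show (0:Nat) + (d'+1) = 1 + d' by ring]
            exact ih (x+3) 0 1 0 0 d' (by omega) (by omega) (by omega)
          | zero =>
            have e2 : PySem.Chars.isIn ['>','2'] (pvSt (x+3) 0 0 0 0 0) = false := by
              rw [pvIsIn_st]; simp
            have e3 : PySem.Chars.isIn ['>','3'] (pvSt (x+3) 0 0 0 0 0) = false := by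
              rw [pvIsIn_st]; simp
            simp only [pvLoop, Bool.false_eq_true, reduceIte, e1, Bool.true_or, pvStep1, e2, e3]
            rw [show x + 3*(0+1) = x + 3 + 3*0 by ring]
            exact ih (x+3) 0 0 0 0 0 (by omega) (by omega) (by omega)
    | zero =>
      cases c with
      | succ c' =>
        have hz : z = 0 := by omega
        subst hz
        have e1 : PySem.Chars.isIn ['>','1'] (pvSt x y 0 0 (c'+1) d) = false := by
          rw [pvIsIn_st]; simp [List.replicate_succ]
        have e2 : PySem.Chars.isIn ['>','2'] (pvSt x y 0 0 (c'+1) d) = true := by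
          rw [pvIsIn_st]; simp [List.replicate_succ]
        cases c' with
        | succ c'' =>
          have e3 : PySem.Chars.isIn ['>','3'] (pvSt x (y+1) 0 0 (c''+1) d) = false := by
            rw [pvIsIn_st]; simp [List.replicate_succ]
          simp only [pvLoop, Bool.false_eq_true, reduceIte, e1, Bool.false_or, e2, Bool.true_or, pvStep2, e3]
          rw [show x + 3*0 = x + 3*0 by ring, show y + (c''+1+1) = (y+1) + (c''+1) by ring]
          exact ih x (y+1) 0 0 (c''+1) d (by omega) (by omega) (by omega)
        | zero =>
          cases d with
          | succ d' =>
            have e3 : PySem.Chars.isIn ['>','3'] (pvSt x (y+1) 0 0 0 (d'+1)) = true := by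
              rw [pvIsIn_st]; simp [List.replicate_succ]
            simp only [pvLoop, Bool.false_eq_true, reduceIte, e1, Bool.false_or, e2, Bool.true_or, pvStep2, e3, pvStep3]
            rw [show y + (0+1) = (y+1) + 0 by ring, show (0:Nat) + (d'+1) = 1 + d' by ring]
            exact ih x (y+1) 1 0 0 d' (by omega) (by omega) (by omega)
          | zero =>
            have e3 : PySem.Chars.isIn ['>','3'] (pvSt x (y+1) 0 0 0 0) = false := by
              rw [pvIsIn_st]; simp
            simp only [pvLoop, Bool.false_eq_true, reduceIte, e1, Bool.false_or, e2, Bool.true_or, pvStep2, e3]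
            rw [show y + (0+1) = (y+1) + 0 by ring]
            exact ih x (y+1) 0 0 0 0 (by omega) (by omega) (by omega)
      | zero =>
        cases d with
        | succ d' =>
          have e1 : PySem.Chars.isIn ['>','1'] (pvSt x y z 0 0 (d'+1)) = false := by
            rw [pvIsIn_st]; simp [List.replicate_succ]
          have e2 : PySem.Chars.isIn ['>','2'] (pvSt x y z 0 0 (d'+1)) = false := by
            rw [pvIsIn_st]; simp [List.replicate_succ]
          have e3 : PySem.Chars.isIn ['>','3'] (pvSt x y z 0 0 (d'+1)) = true := by
            rw [pvIsIn_st]; simp [List.replicate_succ]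
          simp only [pvLoop, Bool.false_eq_true, reduceIte, e1, e2, e3, Bool.false_or, Bool.or_true, if_true, pvStep3]
          rw [show z + (d'+1) = (z+1) + d' by ring]
          exact ih x y (z+1) 0 0 d' (by omega) (by omega) (by omega)
        | zero =>
          have e1 : PySem.Chars.isIn ['>','1'] (pvSt x y z 0 0 0) = false := by
            rw [pvIsIn_st]; simp
          have e2 : PySem.Chars.isIn ['>','2'] (pvSt x y z 0 0 0) = false := by
            rw [pvIsIn_st]; simp
          have e3 : PySem.Chars.isIn ['>','3'] (pvSt x y z 0 0 0) = false := by
            rw [pvIsIn_st]; simp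
          simp only [pvLoop, Bool.false_eq_true, reduceIte, e1, e2, e3, Bool.or_false]
          simp [pvSt]

lemma pvGo (L : List Char) : ∀ (acc : List Char) (fuel : Nat), '>' ∉ L → L.length + 1 ≤ fuel →
    PySem.Chars.replace.go ['>'] [] fuel (L ++ ['>']) acc = acc.reverse ++ L := by
  induction L with
  | nil =>
    intro acc fuel _ hf
    match fuel, hf with
    | fuel+1, _ =>
      simp [PySem.Chars.replace.go, List.isPrefixOf]
      cases fuel <;> simp [PySem.Chars.replace.go]
  | cons a L ih =>
    intro acc fuel hL hf
    have ha : a ≠ '>' := fun h => hL (by simp [h])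
    have hL' : '>' ∉ L := fun h => hL (by simp [h])
    match fuel, hf with
    | fuel+1, hf =>
      simp only [List.cons_append, PySem.Chars.replace.go, List.isPrefixOf]
      rw [if_neg (by simp [Ne.symm ha])]
      rw [ih (a :: acc) fuel hL' (by simp at hf; omega)]
      simp

lemma pvReplace (L : List Char) (hL : '>' ∉ L) :
    PySem.Chars.replace (L ++ ['>']) ['>'] [] = L := by
  rw [PySem.Chars.replace]
  simp only [List.isEmpty_cons]
  rw [show (L ++ ['>']).length = L.length + 1 by simp]
  simpa using pvGo L [] (L.length + 1) hL le_rfl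

-- ===== VERDICT (by name: the statement is the Claim_ definition above) =====
theorem f_spec : Claim_equal_f := by
  intro k _
  unfold Spec_f f f_alt
  have hst : ('>' :: (List.replicate 11 '1' ++ PySem.List.pyRepeat ['2'] k ++ List.replicate 11 '3'))
      = pvSt 0 0 0 11 k.toNat 11 := by
    simp [pvSt, PySem.List.pyRepeat_singleton]
  simp only [hst]
  rw [show (pvSt 0 0 0 11 k.toNat 11).length = 11 + k.toNat + 11 + 1 by
    simp [pvSt]; omega]
  rw [pvLoop_st (11 + k.toNat + 11 + 1) 0 0 0 11 k.toNat 11 (by omega) (by omega) (by omega)]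
  rw [show List.replicate (0 + 3*11) '2' ++ List.replicate (0 + k.toNat) '3'
        ++ List.replicate (0 + 11) '1' ++ ['>']
      = (List.replicate 33 '2' ++ List.replicate k.toNat '3' ++ List.replicate 11 '1') ++ ['>'] by
    simp [List.append_assoc]]
  rw [pvReplace _ (by simp [List.mem_append, List.mem_replicate])]
  simp [PySem.List.pyRepeat_singleton]
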